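-- pv_equiv track=rewrite | github.com/sohmb01/Leetcode-Solutions | solutions/MEDIUM/2691.count-vowel-strings-in-ranges.py | vowelStrings
-- ===== SOURCE A (Python) =====
-- from typing import List
--
-- def vowelStrings(words: List[str], queries: List[List[int]]) -> List[int]:
--     n = len(words)
--     vowels = {'a','e','i','o','u'}
--     prefix = [0]
--     last = 0
--     for word in words:
--         if word[0] in vowels and word[-1] in vowels:
--             prefix.append(last + 1)
--         else:
--             prefix.append(last)
--         last = prefix[-1]
--     ans = []
--     for query in queries:
--         l,r = query[0],query[1]
--         ans.append(prefix[r+1]-prefix[l])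
--     return ans
-- ===== SOURCE B (Python) =====
-- from typing import List
--
-- def _bisect_left(a, x):
--     lo, hi = 0, len(a)
--     while lo < hi:
--         mid = (lo + hi) // 2
--         if a[mid] < x:
--             lo = mid + 1
--         else:
--             hi = mid
--     return lo
--
-- def vowelStrings(words: List[str], queries: List[List[int]]) -> List[int]:
--     vowels = {'a', 'e', 'i', 'o', 'u'}
--     idx = [i for i, w in enumerate(words) if w[0] in vowels and w[-1] in vowels]
--     pre = [_bisect_left(idx, j) for j in range(len(words) + 1)]
--     return [pre[q[1] + 1] - pre[q[0]] for q in queries]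
-- ===== Notes on version B (the rewrite author's own statement) =====
-- stated objective: alternative
-- what changed: B replaces A's streaming prefix accumulation (running `last` variable with branch appends) by a once-built list of the vowel-word positions, computing each prefix entry by binary search over that list; queries difference the same table.
import Mathlib
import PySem

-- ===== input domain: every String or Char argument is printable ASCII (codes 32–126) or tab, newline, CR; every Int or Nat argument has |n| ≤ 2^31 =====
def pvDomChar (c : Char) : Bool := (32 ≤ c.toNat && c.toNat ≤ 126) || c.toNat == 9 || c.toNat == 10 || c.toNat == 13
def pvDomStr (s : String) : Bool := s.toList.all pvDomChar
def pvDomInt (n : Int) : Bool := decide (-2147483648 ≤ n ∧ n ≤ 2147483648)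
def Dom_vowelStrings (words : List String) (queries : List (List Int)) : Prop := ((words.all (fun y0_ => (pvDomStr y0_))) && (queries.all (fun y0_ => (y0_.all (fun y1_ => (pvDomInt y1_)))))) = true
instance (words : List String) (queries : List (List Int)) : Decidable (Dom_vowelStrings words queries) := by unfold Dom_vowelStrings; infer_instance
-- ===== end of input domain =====

-- B replaces A's streaming prefix accumulation (running `last` + branch appends) by a
-- once-built list of the vowel-word positions, producing each prefix count by binary
-- search over it; queries read the same table (objective: alternative).

-- ===== PORT A =====
-- the vowel set both Pythons build as `{'a','e','i','o','u'}`
def pvVowelsA : PySem.Set Char := PySem.Set.ofList ['a', 'e', 'i', 'o', 'u']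

-- one iteration of A's `for word in words` loop; state = (prefix, last)
def pvStepA (vowels : PySem.Set Char) (st : List Int × Int) (word : String) : List Int × Int :=
  let pre' :=
    if ((PySem.Str.pyGet? word 0).map (fun c => PySem.Set.contains vowels c)).getD false
        && ((PySem.Str.pyGet? word (-1)).map (fun c => PySem.Set.contains vowels c)).getD false
    then st.1 ++ [st.2 + 1]
    else st.1 ++ [st.2]
  (pre', (PySem.List.pyGet? pre' (-1)).getD 0)   -- last = prefix[-1]

-- (A's `n = len(words)` is never used and is omitted)
def vowelStrings (words : List String) (queries : List (List Int)) : List Int :=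
  let st := words.foldl (pvStepA pvVowelsA) ([0], 0)
  let pref := st.1
  queries.foldl (fun ans q =>
      let l := (PySem.List.pyGet? q 0).getD 0
      let r := (PySem.List.pyGet? q 1).getD 0
      ans ++ [(PySem.List.pyGet? pref (r + 1)).getD 0 - (PySem.List.pyGet? pref l).getD 0]) []

-- ===== PORT B =====
-- B's per-word test `w[0] in vowels and w[-1] in vowels`
def pvIsVowelWordB (vowels : PySem.Set Char) (w : String) : Bool :=
  ((PySem.Str.pyGet? w 0).map (fun c => PySem.Set.contains vowels c)).getD false
  && ((PySem.Str.pyGet? w (-1)).map (fun c => PySem.Set.contains vowels c)).getD false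

-- Source B's `_bisect_left` is the stdlib bisect algorithm, ported as the prelude's
-- primitive PySem.List.bisectLeft
def vowelStrings_alt (words : List String) (queries : List (List Int)) : List Int :=
  let idx : List Int := (PySem.List.enumerate words).filterMap
      (fun p => if pvIsVowelWordB pvVowelsA p.2 then some p.1 else none)
  let pre := (PySem.List.pyRange 0 ((words.length : Int) + 1) 1).map
      (fun j => ((PySem.List.bisectLeft idx j : Nat) : Int))
  queries.map (fun q =>
      (PySem.List.pyGet? pre ((PySem.List.pyGet? q 1).getD 0 + 1)).getD 0
        - (PySem.List.pyGet? pre ((PySem.List.pyGet? q 0).getD 0)).getD 0)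

-- ===== PRECONDITION & SPEC =====
-- Pre_ excludes exactly the inputs on which A raises IndexError (an empty-string word,
-- a query of length < 2, or a query endpoint outside Python's wrap range for the
-- length-(n+1) prefix list); Python B raises on exactly the same inputs.
def Pre_vowelStrings (words : List String) (queries : List (List Int)) : Prop :=
  (∀ w ∈ words, w.toList ≠ []) ∧
  (∀ q ∈ queries, 2 ≤ q.length ∧
    -((words.length : Int) + 1) ≤ (PySem.List.pyGet? q 0).getD 0 ∧
    (PySem.List.pyGet? q 0).getD 0 ≤ (words.length : Int) ∧
    -((words.length : Int) + 2) ≤ (PySem.List.pyGet? q 1).getD 0 ∧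
    (PySem.List.pyGet? q 1).getD 0 < (words.length : Int))

instance (words : List String) (queries : List (List Int)) : Decidable (Pre_vowelStrings words queries) := by
  unfold Pre_vowelStrings; infer_instance

def pvWitness_vowelStrings : List String × List (List Int) := (["ab", "ae"], [[0, 1], [1, 1]])

def Spec_vowelStrings (words : List String) (queries : List (List Int)) (out : List Int) : Prop := out = vowelStrings_alt words queries
instance (words : List String) (queries : List (List Int)) (out : List Int) : Decidable (Spec_vowelStrings words queries out) := by unfold Spec_vowelStrings; infer_instance

-- ===== CLAIM (what is proved, stated in full; the proofs are below) =====
def Claim_equal_vowelStrings : Prop := ∀ (words : List String) (queries : List (List Int)), Dom_vowelStrings words queries → Pre_vowelStrings words queries → Spec_vowelStrings words queries (vowelStrings words queries)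

-- ===== LEMMAS AND PROOFS =====

-- the shared per-word vowel test
def pvVW (w : String) : Bool := pvIsVowelWordB pvVowelsA w

-- running prefix counts produced by A's loop, after the initial 0
def pvScan (c : Int) : List String → List Int
  | [] => []
  | w :: t => (c + (if pvVW w then 1 else 0)) :: pvScan (c + (if pvVW w then 1 else 0)) t

lemma pvStepA_eq (st : List Int × Int) (w : String) :
    pvStepA pvVowelsA st w =
      (st.1 ++ [st.2 + (if pvVW w then 1 else 0)], st.2 + (if pvVW w then 1 else 0)) := by
  have hc : (((PySem.Str.pyGet? w 0).map (fun c => PySem.Set.contains pvVowelsA c)).getD false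
      && ((PySem.Str.pyGet? w (-1)).map (fun c => PySem.Set.contains pvVowelsA c)).getD false)
      = pvVW w := rfl
  simp only [pvStepA, hc]
  by_cases h : pvVW w <;>
    simp [h, PySem.List.pyGet?_neg_one_append_singleton]

lemma foldA_scan : ∀ (ws : List String) (pre : List Int) (c : Int),
    ws.foldl (pvStepA pvVowelsA) (pre ++ [c], c)
      = (pre ++ [c] ++ pvScan c ws, c + ((ws.countP pvVW : Nat) : Int)) := by
  intro ws
  induction ws with
  | nil => intro pre c; simp [pvScan]
  | cons w t ih =>
      intro pre c
      rw [List.foldl_cons, pvStepA_eq]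
      have := ih (pre ++ [c]) (c + (if pvVW w then 1 else 0))
      simp only [List.append_assoc] at this ⊢
      rw [this]
      simp [pvScan, List.countP_cons]
      by_cases h : pvVW w <;> simp [h] <;> omega

lemma length_pvScan : ∀ (ws : List String) (c : Int), (pvScan c ws).length = ws.length := by
  intro ws
  induction ws with
  | nil => intro c; simp [pvScan]
  | cons w t ih => intro c; simp [pvScan, ih]

lemma getScan : ∀ (ws : List String) (k : Nat) (c : Int), k ≤ ws.length →
    (c :: pvScan c ws)[k]? = some (c + (((ws.take k).countP pvVW : Nat) : Int)) := by
  intro ws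
  induction ws with
  | nil =>
      intro k c hk
      have hk0 : k = 0 := by simpa using hk
      subst hk0
      simp [pvScan]
  | cons w t ih =>
      intro k c hk
      cases k with
      | zero => simp
      | succ m =>
          simp only [pvScan, List.getElem?_cons_succ]
          rw [ih m _ (by simpa using hk)]
          simp [List.countP_cons]
          by_cases h : pvVW w <;> simp [h] <;> omega

lemma countLt (k : Int) : ∀ (ws : List String) (s : Int),
    ((PySem.List.enumerate ws s).filterMap
        (fun p => if pvVW p.2 then some p.1 else none)).countP (fun i => decide (i < k))
      = (ws.take (k - s).toNat).countP pvVW := by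
  intro ws
  induction ws with
  | nil => intro s; simp [PySem.List.enumerate_nil]
  | cons w t ih =>
      intro s
      rw [PySem.List.enumerate_cons]
      by_cases hl : k - s ≤ 0
      · have h0 : (k - s).toNat = 0 := by omega
        have h1 : (k - (s + 1)).toNat = 0 := by omega
        have hs : ¬ s < k := by omega
        by_cases h : pvVW w <;>
          simp [h, ih (s + 1), h0, h1, hs]
      · have h0 : (k - s).toNat = (k - (s + 1)).toNat + 1 := by omega
        have hs : s < k := by omega
        by_cases h : pvVW w <;>
          simp [h, ih (s + 1), h0, List.take_succ_cons, hs]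

-- the vowel positions are listed in (weakly) increasing order
lemma idx_sorted (words : List String) :
    ((PySem.List.enumerate words).filterMap
        (fun p => if pvVW p.2 then some p.1 else none)).Pairwise (· ≤ ·) := by
  refine List.Pairwise.filterMap _ ?_ (PySem.List.pairwise_lt_enumerate words 0)
  intro a a' hR b hb b' hb'
  by_cases h : pvVW a.2 <;> simp [h] at hb
  by_cases h' : pvVW a'.2 <;> simp [h'] at hb'
  omega

-- a countP over a list whose first k elements satisfy p and whose rest do not is k
lemma countP_of_cut (xs : List Int) (p : Int → Bool) (k : Nat) (hk : k ≤ xs.length)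
    (h1 : ∀ j (hj : j < xs.length), j < k → p xs[j])
    (h2 : ∀ j (hj : j < xs.length), k ≤ j → ¬ p xs[j] = true) :
    xs.countP p = k := by
  rw [← List.take_append_drop k xs, List.countP_append]
  have ht : (xs.take k).countP p = k := by
    rw [List.countP_eq_length.mpr, List.length_take]
    · omega
    · intro a ha
      obtain ⟨j, hj, rfl⟩ := List.mem_take_iff_getElem.mp ha
      exact h1 j (by omega) (by omega)
  have hd : (xs.drop k).countP p = 0 := by
    rw [List.countP_eq_zero.mpr]
    intro a ha
    obtain ⟨j, hj, rfl⟩ := List.mem_iff_getElem.mp ha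
    rw [List.getElem_drop]
    exact h2 (k + j) (by simp at hj; omega) (by omega)
  omega

lemma bisectLeft_count (xs : List Int) (x : Int) (hs : xs.Pairwise (· ≤ ·)) :
    xs.countP (fun i => decide (i < x)) = PySem.List.bisectLeft xs x := by
  obtain ⟨hk, h1, h2⟩ := PySem.List.bisectLeft_spec xs x hs
  refine countP_of_cut xs _ _ hk ?_ ?_
  · intro j hj hjk; simpa using h1 j hj hjk
  · intro j hj hjk; simpa using h2 j hj hjk

-- the two prefix tables coincide: A's running accumulation is B's per-threshold
-- binary-search count over the vowel positions
lemma pref_eq (words : List String) :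
    (0 : Int) :: pvScan 0 words
      = (PySem.List.pyRange 0 ((words.length : Int) + 1) 1).map
          (fun j => ((PySem.List.bisectLeft ((PySem.List.enumerate words).filterMap
              (fun p => if pvVW p.2 then some p.1 else none)) j : Nat) : Int)) := by
  apply List.ext_getElem?
  intro k
  set L : List Int := (PySem.List.enumerate words).filterMap
      (fun p => if pvVW p.2 then some p.1 else none) with hL
  by_cases hk : k ≤ words.length
  · rw [getScan words k 0 hk, List.getElem?_map, PySem.List.getElem?_pyRange_one,
      if_pos (show k < (((words.length : Int) + 1 - 0)).toNat by omega)]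
    have hb := bisectLeft_count L ((k : Nat) : Int) (idx_sorted words)
    have hc := countLt ((k : Nat) : Int) words 0
    rw [← hL] at hc
    simp only [Int.sub_zero, Int.toNat_natCast] at hc
    rw [hc] at hb
    simp only [Option.map_some, Int.zero_add]
    rw [← hb]
  · have h1 : ((0 : Int) :: pvScan 0 words)[k]? = none := by
      rw [List.getElem?_eq_none_iff]
      simp [length_pvScan]; omega
    have h2 : ((PySem.List.pyRange 0 ((words.length : Int) + 1) 1).map
        (fun j => ((PySem.List.bisectLeft ((PySem.List.enumerate words).filterMap
            (fun p => if pvVW p.2 then some p.1 else none)) j : Nat) : Int)))[k]? = none := by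
      rw [List.getElem?_eq_none_iff]
      rw [List.length_map, PySem.List.length_pyRange_one]; omega
    rw [h1, h2]

-- ===== VERDICT (by name: the statement is the Claim_ definition above) =====
theorem vowelStrings_spec : Claim_equal_vowelStrings := by
  intro words queries _hdom _hpre
  unfold Spec_vowelStrings vowelStrings vowelStrings_alt
  dsimp only
  rw [PySem.List.foldl_append_singleton_eq_map, List.nil_append]
  have hfold := foldA_scan words [] 0
  simp only [List.nil_append] at hfold
  have hpref : (words.foldl (pvStepA pvVowelsA) ([0], 0)).1 = 0 :: pvScan 0 words := by
    rw [hfold]; rfl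
  refine List.map_congr_left ?_
  intro q _hq
  rw [hpref, pref_eq words]
  rfl
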